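-- pv_equiv track=rewrite | github.com/hrookim/Algorithm_python | 2023/2023_1019/[Programmers]마법의엘리베이터/main.py | solution
-- ===== SOURCE A (Python) =====
-- def solution(storey):
--     answer = 0
--
--     Q = storey
--
--     while Q >= 1:
--         R = Q % 10
--         Q = Q // 10
--
--         if R < 5:
--             answer += R
--         elif R > 5:
--             answer += 10 - R
--             Q += 1
--         elif R == 5:
--             answer += 5
--             if Q % 10 >= 5:
--                 Q += 1
--
--     else:
--         answer += Q
--
--     return answer
-- ===== SOURCE B (Python) =====
-- def solution(storey):
--     if storey < 1:
--         return storey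
--     return _min_moves(storey)
--
-- def _min_moves(n):
--     # minimum presses to bring n to 0 using +/-1, +/-10, +/-100, ...
--     if n < 10:
--         return min(n, 11 - n)
--     r = n % 10
--     q = n // 10
--     return min(r + _min_moves(q), (10 - r) + _min_moves(q + 1))
-- ===== Notes on version B (the rewrite author's own statement) =====
-- stated objective: alternative
-- what changed: Replaces A's single-pass greedy with look-ahead tie-breaking by a recursion over digits that takes the minimum of the two carry choices at each digit (equal because the greedy is optimal).
import Mathlib
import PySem

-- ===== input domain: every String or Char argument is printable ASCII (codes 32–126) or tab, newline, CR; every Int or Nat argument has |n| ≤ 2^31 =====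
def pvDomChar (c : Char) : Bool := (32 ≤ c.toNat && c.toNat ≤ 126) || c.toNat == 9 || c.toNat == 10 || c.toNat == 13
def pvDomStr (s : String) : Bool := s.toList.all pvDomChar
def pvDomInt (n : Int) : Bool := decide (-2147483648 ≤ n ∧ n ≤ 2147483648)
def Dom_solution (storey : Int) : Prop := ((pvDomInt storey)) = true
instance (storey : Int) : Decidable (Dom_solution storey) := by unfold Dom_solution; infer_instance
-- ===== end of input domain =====

-- B replaces A's single-pass greedy (with look-ahead tie-breaking at digit 5) by a
-- min-over-both-carry-choices recursion on the digits; same asymptotic cost, different decomposition.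

-- ===== PORT A =====
-- Python while-loop with accumulator `answer`; the while-else `answer += Q` is the final branch.
def solutionLoop (answer Q : Int) : Int :=
  if Q ≥ 1 then
    if PySem.Int.mod Q 10 < 5 then
      solutionLoop (answer + PySem.Int.mod Q 10) (PySem.Int.floordiv Q 10)
    else if PySem.Int.mod Q 10 > 5 then
      solutionLoop (answer + (10 - PySem.Int.mod Q 10)) (PySem.Int.floordiv Q 10 + 1)
    else
      if PySem.Int.mod (PySem.Int.floordiv Q 10) 10 ≥ 5 then
        solutionLoop (answer + 5) (PySem.Int.floordiv Q 10 + 1)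
      else
        solutionLoop (answer + 5) (PySem.Int.floordiv Q 10)
  else answer + Q
termination_by Q.toNat
decreasing_by
  all_goals
    simp only [PySem.Int.floordiv_eq_ediv_of_pos (by norm_num : (0:Int) < 10),
               PySem.Int.mod_eq_emod_of_pos (by norm_num : (0:Int) < 10)] at *
  all_goals omega

def solution (storey : Int) : Int := solutionLoop 0 storey

-- ===== PORT B =====
def minMoves (n : Int) : Int :=
  if n < 10 then min n (11 - n)
  else
    min (PySem.Int.mod n 10 + minMoves (PySem.Int.floordiv n 10))
        ((10 - PySem.Int.mod n 10) + minMoves (PySem.Int.floordiv n 10 + 1))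
termination_by n.toNat
decreasing_by
  all_goals
    simp only [PySem.Int.floordiv_eq_ediv_of_pos (by norm_num : (0:Int) < 10)] at *
  all_goals omega

def solution_alt (storey : Int) : Int :=
  if storey < 1 then storey else minMoves storey

-- ===== PRECONDITION & SPEC =====
def Spec_solution (storey : Int) (out : Int) : Prop := out = solution_alt storey
instance (storey : Int) (out : Int) : Decidable (Spec_solution storey out) := by unfold Spec_solution; infer_instance

-- ===== CLAIM (what is proved, stated in full; the proofs are below) =====
def Claim_equal_solution : Prop := ∀ (storey : Int), Dom_solution storey → Spec_solution storey (solution storey)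

-- ===== LEMMAS AND PROOFS =====

theorem pv_mod10 (a : Int) : PySem.Int.mod a 10 = a % 10 :=
  PySem.Int.mod_eq_emod_of_pos (by norm_num)

theorem pv_div10 (a : Int) : PySem.Int.floordiv a 10 = a / 10 :=
  PySem.Int.floordiv_eq_ediv_of_pos (by norm_num)

-- one-step unfolding of A's loop, with Python mod/floordiv written as emod/ediv
theorem solutionLoop_eq (a Q : Int) : solutionLoop a Q =
    if Q ≥ 1 then
      if Q % 10 < 5 then solutionLoop (a + Q % 10) (Q / 10)
      else if Q % 10 > 5 then solutionLoop (a + (10 - Q % 10)) (Q / 10 + 1)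
      else if (Q / 10) % 10 ≥ 5 then solutionLoop (a + 5) (Q / 10 + 1)
      else solutionLoop (a + 5) (Q / 10)
    else a + Q := by
  rw [solutionLoop]; simp only [pv_mod10, pv_div10]

-- one-step unfolding of B's recursion
theorem minMoves_eq (n : Int) : minMoves n =
    if n < 10 then min n (11 - n)
    else min (n % 10 + minMoves (n / 10)) ((10 - n % 10) + minMoves (n / 10 + 1)) := by
  rw [minMoves]; simp only [pv_mod10, pv_div10]

-- adjacency/monotonicity facts about minMoves, by strong induction
theorem mm_adj : ∀ (k : Nat) (q : Int), 0 ≤ q → q.toNat < k →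
    (minMoves (q+1) ≤ minMoves q + 1 ∧ minMoves q ≤ minMoves (q+1) + 1 ∧
     (5 ≤ q % 10 → minMoves (q+1) ≤ minMoves q) ∧
     (q % 10 < 5 → minMoves q ≤ minMoves (q+1))) := by
  intro k
  induction k with
  | zero => intro q h0 h; omega
  | succ k ih =>
    intro q h0 hk
    by_cases hsmall : q ≤ 8
    · rw [minMoves_eq (q+1), if_pos (show q+1 < 10 by omega),
          minMoves_eq q, if_pos (show q < 10 by omega)]
      omega
    · by_cases h9 : q = 9
      · subst h9
        have m1 : minMoves 1 = 1 := by rw [minMoves_eq]; norm_num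
        have m2 : minMoves 2 = 2 := by rw [minMoves_eq]; norm_num
        have m9 : minMoves 9 = 2 := by rw [minMoves_eq]; norm_num
        have m10 : minMoves 10 = 1 := by rw [minMoves_eq]; norm_num [m1, m2]
        norm_num [m9, m10]
      · -- q ≥ 10
        have hq10 : 10 ≤ q := by omega
        have ih1 := ih (q / 10) (by omega) (by omega)
        by_cases hr8 : q % 10 ≤ 8
        · have e1 : (q+1) % 10 = q % 10 + 1 := by omega
          have e2 : (q+1) / 10 = q / 10 := by omega
          rw [minMoves_eq (q+1), minMoves_eq q, e1, e2,
              if_neg (show ¬ q+1 < 10 by omega), if_neg (show ¬ q < 10 by omega)]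
          omega
        · -- q % 10 = 9
          have hr9 : q % 10 = 9 := by omega
          have e1 : (q+1) % 10 = 0 := by omega
          have e2 : (q+1) / 10 = q / 10 + 1 := by omega
          have ih2 := ih (q / 10 + 1) (by omega) (by omega)
          rw [minMoves_eq (q+1), minMoves_eq q, e1, e2,
              if_neg (show ¬ q+1 < 10 by omega), if_neg (show ¬ q < 10 by omega)]
          omega

-- the accumulator of A's loop is additive
theorem loop_acc : ∀ (k : Nat) (a Q : Int), Q.toNat < k →
    solutionLoop a Q = a + solutionLoop 0 Q := by
  intro k
  induction k with
  | zero => intro a Q h; omega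
  | succ k ih =>
    intro a Q hk
    by_cases hQ : Q ≥ 1
    · rw [solutionLoop_eq a Q, solutionLoop_eq 0 Q, if_pos hQ]
      split_ifs with h1 h2 h3
      · rw [ih _ _ (by omega), ih (0 + Q % 10) _ (by omega)]; ring
      · rw [ih _ _ (by omega), ih (0 + (10 - Q % 10)) _ (by omega)]; ring
      · rw [ih _ _ (by omega), ih (0 + 5) _ (by omega)]; ring
      · rw [ih _ _ (by omega), ih (0 + 5) _ (by omega)]; ring
    · rw [solutionLoop_eq a Q, solutionLoop_eq 0 Q, if_neg hQ, if_neg hQ]; ring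

-- A's greedy equals B's recursion on every positive storey
set_option maxRecDepth 4000 in
theorem loop_eq_minMoves : ∀ (k : Nat) (Q : Int), 1 ≤ Q → Q.toNat < k →
    solutionLoop 0 Q = minMoves Q := by
  intro k
  induction k with
  | zero => intro Q h1 h; omega
  | succ k ih =>
    intro Q h1 hk
    by_cases hsmall : Q ≤ 9
    · have L0 : ∀ a : Int, solutionLoop a 0 = a := by
        intro a; rw [solutionLoop_eq]; norm_num
      have L1 : ∀ a : Int, solutionLoop a 1 = a + 1 := by
        intro a; rw [solutionLoop_eq]; norm_num [L0]
      interval_cases Q <;> rw [solutionLoop_eq, minMoves_eq] <;> norm_num [L0, L1]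
    · have hQ10 : 10 ≤ Q := by omega
      have hq1 : 1 ≤ Q / 10 := by omega
      have adj := mm_adj k (Q / 10) (by omega) (by omega)
      rw [solutionLoop_eq 0 Q, minMoves_eq Q, if_pos (show Q ≥ 1 by omega),
          if_neg (show ¬ Q < 10 by omega)]
      split_ifs with h1' h2 h3
      · rw [loop_acc Q.toNat _ _ (by omega), ih (Q / 10) hq1 (by omega)]
        omega
      · rw [loop_acc Q.toNat _ _ (by omega), ih (Q / 10 + 1) (by omega) (by omega)]
        omega
      · rw [loop_acc Q.toNat _ _ (by omega), ih (Q / 10 + 1) (by omega) (by omega)]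
        omega
      · rw [loop_acc Q.toNat _ _ (by omega), ih (Q / 10) hq1 (by omega)]
        omega

-- ===== VERDICT (by name: the statement is the Claim_ definition above) =====
theorem solution_spec : Claim_equal_solution := by
  intro storey _
  unfold Spec_solution solution solution_alt
  by_cases h : storey < 1
  · rw [solutionLoop_eq, if_neg (by omega), if_pos h]; ring
  · rw [if_neg h]
    exact loop_eq_minMoves (storey.toNat + 1) storey (by omega) (by omega)
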